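-- pv_equiv track=rewrite | github.com/Teo56/Radar-sensor-positioning | main.py | largest_n
-- ===== SOURCE A (Python) =====
-- def largest_n(a, b, n):
--     for t in range(n):
--         b.append(abs(a[t+1]-a[t]))
--
--     for i in range(len(a) - (n+1)):
--         if (abs(a[i+n+1]-a[i+n]) > min(b)):
--             index = b.index(min(b))
--             b[index] = abs(a[i+n+1]-a[i+n])
--     return b
-- ===== SOURCE B (Python) =====
-- def _ins(order, p):
--     lo, hi = 0, len(order)
--     while lo < hi:
--         mid = (lo + hi) // 2
--         if order[mid] < p:
--             lo = mid + 1
--         else: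
--             hi = mid
--     order.insert(lo, p)
--
-- def largest_n(a, b, n):
--     b += [abs(a[t + 1] - a[t]) for t in range(n)]
--     order = []
--     for i, v in enumerate(b):
--         _ins(order, (v, i))
--     for j in range(n, len(a) - 1):
--         d = abs(a[j + 1] - a[j])
--         if order and d > order[0][0]:
--             m, i = order.pop(0)
--             b[i] = d
--             _ins(order, (d, i))
--     return b
-- ===== Notes on version B (the rewrite author's own statement) =====
-- stated objective: faster
-- what changed: B maintains a sorted ordered-index over b -- an ascending list of (value, position) pairs kept sorted by binary-search insertion -- so A's per-iteration min(b) scans (computed twice) and b.index(min(b)) scan disappear: the minimum and its leftmost position are always the head pair, a non-replacing iteration is O(1) and a replacement is a pop/binary-search re-insert.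
import Mathlib
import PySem

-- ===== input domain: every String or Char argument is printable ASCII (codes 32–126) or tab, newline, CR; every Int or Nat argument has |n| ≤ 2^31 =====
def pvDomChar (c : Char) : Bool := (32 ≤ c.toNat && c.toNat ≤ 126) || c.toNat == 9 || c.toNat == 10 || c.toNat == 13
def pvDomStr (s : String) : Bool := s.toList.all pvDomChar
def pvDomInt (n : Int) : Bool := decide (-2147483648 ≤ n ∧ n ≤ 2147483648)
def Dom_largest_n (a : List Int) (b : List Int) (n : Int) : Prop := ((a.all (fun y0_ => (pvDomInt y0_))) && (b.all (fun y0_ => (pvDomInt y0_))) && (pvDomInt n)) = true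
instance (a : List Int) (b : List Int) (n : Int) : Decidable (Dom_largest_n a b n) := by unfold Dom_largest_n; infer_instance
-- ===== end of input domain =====

-- B maintains an ordered index over b — an ascending list of (value, position) pairs whose head is
-- always (min, leftmost position of the min) — instead of A's per-iteration min(b)/b.index(min(b)) scans.
-- A mutates b in place (append/assignment); B performs the same mutations; the equivalence proved is about the RETURN value.

-- ===== PORT A =====
def largest_n (a : List Int) (b : List Int) (n : Int) : List Int :=
  -- for t in range(n): b.append(abs(a[t+1]-a[t]))
  let b1 := (PySem.List.pyRange 0 n).foldl
    (fun bb t => bb ++ [|PySem.List.pyGetD a (t + 1) 0 - PySem.List.pyGetD a t 0|]) b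
  -- for i in range(len(a)-(n+1)): if abs(a[i+n+1]-a[i+n]) > min(b): b[b.index(min(b))] = abs(...)
  (PySem.List.pyRange 0 ((a.length : Int) - (n + 1))).foldl
    (fun bb i =>
      match PySem.List.min? bb (fun x => x) with
      | none => bb   -- min([]) raises ValueError in Python: excluded by Pre_
      | some m =>
        if |PySem.List.pyGetD a (i + n + 1) 0 - PySem.List.pyGetD a (i + n) 0| > m then
          match PySem.List.index? bb m with
          | none => bb   -- unreachable: m ∈ bb
          | some k => bb.set k (|PySem.List.pyGetD a (i + n + 1) 0 - PySem.List.pyGetD a (i + n) 0|)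
        else bb) b1

-- ===== PORT B =====
-- Python tuple comparison (v, i) < (w, j): lexicographic
def pvLt (p q : Int × Int) : Bool := decide (p.1 < q.1 ∨ (p.1 = q.1 ∧ p.2 < q.2))

-- the lo/hi binary-search loop of _ins: leftmost position whose pair is not < p
def pvBisect (o : List (Int × Int)) (p : Int × Int) (lo hi : Nat) : Nat :=
  if lo < hi then
    if pvLt (o.getD ((lo + hi) / 2) (0, 0)) p then pvBisect o p ((lo + hi) / 2 + 1) hi
    else pvBisect o p lo ((lo + hi) / 2)
  else lo
termination_by hi - lo
decreasing_by all_goals omega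

-- _ins(order, p): binary-search the insertion point, then order.insert(lo, p)
def pvIns (p : Int × Int) (o : List (Int × Int)) : List (Int × Int) :=
  PySem.List.insert o ((pvBisect o p 0 o.length : Nat) : Int) p

def largest_n_alt (a : List Int) (b : List Int) (n : Int) : List Int :=
  -- b += [abs(a[t+1] - a[t]) for t in range(n)]
  let b1 := b ++ (PySem.List.pyRange 0 n).map
      (fun t => |PySem.List.pyGetD a (t + 1) 0 - PySem.List.pyGetD a t 0|)
  -- order = []; for i, v in enumerate(b): _ins(order, (v, i))
  let order0 := ((PySem.List.enumerate b1 0).map (fun p => (p.2, p.1))).foldl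
      (fun o q => pvIns q o) []
  -- for j in range(n, len(a)-1): d = abs(a[j+1]-a[j]);
  --   if order and d > order[0][0]: m, i = order.pop(0); b[i] = d; _ins(order, (d, i))
  ((PySem.List.pyRange n ((a.length : Int) - 1)).foldl
    (fun (s : List Int × List (Int × Int)) j =>
      let d := |PySem.List.pyGetD a (j + 1) 0 - PySem.List.pyGetD a j 0|
      match s.2 with
      | [] => s
      | (m, i) :: rest =>
        if d > m then (PySem.List.pySetD s.1 i d, pvIns (d, i) rest) else s)
    (b1, order0)).1

-- ===== PRECONDITION & SPEC =====
-- Pre_ is exactly the inputs on which A returns normally: it excludes only the inputs where A raises —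
-- IndexError (1 ≤ n with n+1 > len(a) in the first loop, or n < -len(a) reached by the second loop) and
-- ValueError from min([]) (empty b with n < 1 while the second loop runs).
def Pre_largest_n (a : List Int) (b : List Int) (n : Int) : Prop :=
  (1 ≤ n → n + 1 ≤ (a.length : Int)) ∧
  (-(a.length : Int) ≤ n ∨ (a.length : Int) ≤ n + 1) ∧
  (b ≠ [] ∨ 1 ≤ n ∨ (a.length : Int) ≤ n + 1)
instance (a : List Int) (b : List Int) (n : Int) : Decidable (Pre_largest_n a b n) := by
  unfold Pre_largest_n; infer_instance
def pvWitness_largest_n : List Int × List Int × Int := ([1, 5, 2, 4], [3], 2)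

def Spec_largest_n (a : List Int) (b : List Int) (n : Int) (out : List Int) : Prop := out = largest_n_alt a b n
instance (a : List Int) (b : List Int) (n : Int) (out : List Int) : Decidable (Spec_largest_n a b n out) := by unfold Spec_largest_n; infer_instance

-- ===== CLAIM (what is proved, stated in full; the proofs are below) =====
def Claim_equal_largest_n : Prop := ∀ (a : List Int) (b : List Int) (n : Int), Dom_largest_n a b n → Pre_largest_n a b n → Spec_largest_n a b n (largest_n a b n)

-- ===== LEMMAS AND PROOFS =====

-- A's per-iteration update, abstracted over the new difference d
def pvStepA (bb : List Int) (d : Int) : List Int :=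
  match PySem.List.min? bb (fun x => x) with
  | none => bb
  | some m =>
    if d > m then
      match PySem.List.index? bb m with
      | none => bb
      | some k => bb.set k d
    else bb

-- B's per-iteration update on its state (list, ordered index)
def pvStepB (s : List Int × List (Int × Int)) (d : Int) : List Int × List (Int × Int) :=
  match s.2 with
  | [] => s
  | (m, i) :: rest =>
    if d > m then (PySem.List.pySetD s.1 i d, pvIns (d, i) rest) else s

-- the pair list B's ordered index ranges over: [(bb[0],0), (bb[1],1), …]
def pvPairs (bb : List Int) : List (Int × Int) :=
  (PySem.List.enumerate bb 0).map (fun p => (p.2, p.1))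

-- B's loop invariant: the ordered index is an ascending rearrangement of pvPairs bb
def pvInv (bb : List Int) (o : List (Int × Int)) : Prop :=
  o.Perm (pvPairs bb) ∧ o.Pairwise (fun p q => pvLt p q = true)

lemma pvLt_iff (p q : Int × Int) : pvLt p q = true ↔ (p.1 < q.1 ∨ (p.1 = q.1 ∧ p.2 < q.2)) := by
  simp [pvLt]

lemma pvLt_trans {p q r : Int × Int} (h1 : pvLt p q = true) (h2 : pvLt q r = true) :
    pvLt p r = true := by
  rw [pvLt_iff] at *; omega

lemma pvLt_total {p q : Int × Int} (h : ¬ pvLt q p = true) (hne : p.2 ≠ q.2) :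
    pvLt p q = true := by
  rw [pvLt_iff] at *; omega

lemma pvBisect_bounds (o : List (Int × Int)) (p : Int × Int) :
    ∀ N lo hi : Nat, hi - lo ≤ N → lo ≤ hi →
      lo ≤ pvBisect o p lo hi ∧ pvBisect o p lo hi ≤ hi := by
  intro N
  induction N with
  | zero =>
    intro lo hi h1 h2
    have : lo = hi := by omega
    subst this
    rw [pvBisect]
    simp
  | succ N ih =>
    intro lo hi h1 h2
    rw [pvBisect]
    by_cases hlt : lo < hi
    · rw [if_pos hlt]
      split
      · have := ih ((lo + hi) / 2 + 1) hi (by omega) (by omega)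
        omega
      · have := ih lo ((lo + hi) / 2) (by omega) (by omega)
        omega
    · rw [if_neg hlt]
      omega

lemma pvBisect_spec (o : List (Int × Int)) (p : Int × Int)
    (ho : o.Pairwise (fun x y => pvLt x y = true)) :
    ∀ N lo hi : Nat, hi - lo ≤ N → lo ≤ hi → hi ≤ o.length →
      (∀ j : Nat, (hj : j < o.length) → j < lo → pvLt (o[j]'hj) p = true) →
      (∀ j : Nat, (hj : j < o.length) → hi ≤ j → ¬ pvLt (o[j]'hj) p = true) →
      (∀ j : Nat, (hj : j < o.length) → j < pvBisect o p lo hi → pvLt (o[j]'hj) p = true) ∧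
      (∀ j : Nat, (hj : j < o.length) → pvBisect o p lo hi ≤ j → ¬ pvLt (o[j]'hj) p = true) := by
  have hpw := List.pairwise_iff_getElem.mp ho
  intro N
  induction N with
  | zero =>
    intro lo hi h1 h2 h3 hlo hhi
    have : lo = hi := by omega
    subst this
    rw [pvBisect]
    simp only [lt_irrefl, if_false]
    exact ⟨fun j hj hjlo => hlo j hj hjlo, fun j hj hjlo => hhi j hj hjlo⟩
  | succ N ih =>
    intro lo hi h1 h2 h3 hlo hhi
    rw [pvBisect]
    by_cases hlt : lo < hi
    · rw [if_pos hlt]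
      have hmid : (lo + hi) / 2 < o.length := by omega
      rw [List.getD_eq_getElem o (0, 0) hmid]
      split
      next hgd =>
        refine ih ((lo + hi) / 2 + 1) hi (by omega) (by omega) h3 ?_ hhi
        intro j hj hjlo
        rcases Nat.lt_or_ge j lo with h' | h'
        · exact hlo j hj h'
        · rcases Nat.lt_or_ge j ((lo + hi) / 2) with h'' | h''
          · exact pvLt_trans (hpw j ((lo + hi) / 2) hj hmid h'') hgd
          · have : j = (lo + hi) / 2 := by omega
            subst this
            exact hgd
      next hgd =>
        refine ih lo ((lo + hi) / 2) (by omega) (by omega) (by omega) hlo ?_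
        intro j hj hjhi
        rcases Nat.lt_or_ge j ((lo + hi) / 2) with h' | h'
        · omega
        · rcases Nat.lt_or_ge j hi with h'' | h''
          · rcases Nat.eq_or_lt_of_le h' with h3' | h3'
            · exact h3' ▸ hgd
            · intro hc
              exact hgd (pvLt_trans (hpw ((lo + hi) / 2) j hmid hj h3') hc)
          · exact hhi j hj h''
    · rw [if_neg hlt]
      have : lo = hi := by omega
      subst this
      exact ⟨fun j hj hjlo => hlo j hj hjlo, fun j hj hjlo => hhi j hj hjlo⟩

lemma pvIns_eq (p : Int × Int) (o : List (Int × Int)) :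
    pvIns p o = o.take (pvBisect o p 0 o.length) ++ p :: o.drop (pvBisect o p 0 o.length) := by
  have hb := pvBisect_bounds o p (o.length - 0) 0 o.length (by omega) (by omega)
  unfold pvIns
  rw [PySem.List.insert_natCast o _ p (by omega)]

lemma pvIns_perm (p : Int × Int) (l : List (Int × Int)) : (pvIns p l).Perm (p :: l) := by
  rw [pvIns_eq]
  exact List.perm_middle.trans (by rw [List.take_append_drop])

lemma pvIns_pairwise (p : Int × Int) (l : List (Int × Int))
    (hl : l.Pairwise (fun x y => pvLt x y = true)) (hsnd : ∀ q ∈ l, q.2 ≠ p.2) :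
    (pvIns p l).Pairwise (fun x y => pvLt x y = true) := by
  have hb := pvBisect_bounds l p (l.length - 0) 0 l.length (by omega) (by omega)
  obtain ⟨hlt, hge⟩ := pvBisect_spec l p hl (l.length - 0) 0 l.length (by omega) (by omega)
    (le_refl _) (by omega) (by omega)
  set r := pvBisect l p 0 l.length with hr
  rw [pvIns_eq]
  have hsplit : l = l.take r ++ l.drop r := (List.take_append_drop r l).symm
  have hcross : ∀ x ∈ l.take r, ∀ y ∈ l.drop r, pvLt x y = true := by
    have := List.pairwise_append.mp (hsplit ▸ hl)
    exact this.2.2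
  have htake_lt : ∀ x ∈ l.take r, pvLt x p = true := by
    intro x hx
    obtain ⟨j, hj, hjm⟩ := List.mem_iff_getElem.mp hx
    have hjr : j < r := by simp [List.length_take] at hj; omega
    rw [List.getElem_take] at hjm
    exact hjm ▸ hlt j (by omega) hjr
  have hdrop_gt : ∀ y ∈ l.drop r, pvLt p y = true := by
    intro y hy
    obtain ⟨j, hj, hjm⟩ := List.mem_iff_getElem.mp hy
    rw [List.getElem_drop] at hjm
    have hjlen : r + j < l.length := by simp [List.length_drop] at hj; omega
    have hnot : ¬ pvLt (l[r + j]'hjlen) p = true := hge (r + j) hjlen (by omega)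
    have hne : y.2 ≠ p.2 := hsnd y (hsplit ▸ List.mem_append_right _ hy)
    rw [hjm] at hnot
    exact pvLt_total hnot (Ne.symm hne)
  rw [List.pairwise_append]
  refine ⟨hl.sublist (List.take_sublist r l), ?_, ?_⟩
  · rw [List.pairwise_cons]
    exact ⟨hdrop_gt, hl.sublist (List.drop_sublist r l)⟩
  · intro x hx y hy
    rcases List.mem_cons.mp hy with h' | h'
    · exact h' ▸ htake_lt x hx
    · exact hcross x hx y h'

lemma pvPairs_length (bb : List Int) : (pvPairs bb).length = bb.length := by
  simp [pvPairs, PySem.List.length_enumerate]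

lemma pvPairs_getElem (bb : List Int) (k : Nat) (hk : k < (pvPairs bb).length) :
    (pvPairs bb)[k] = (bb[k]'(by rwa [pvPairs_length] at hk), (k : Int)) := by
  simp [pvPairs, PySem.List.getElem_enumerate]

lemma pvPairs_snd_distinct (bb : List Int) :
    (pvPairs bb).Pairwise (fun p q => p.2 ≠ q.2) := by
  exact List.Pairwise.map _ (fun a b h => by dsimp; omega)
    (PySem.List.pairwise_lt_enumerate bb 0)

-- initialisation: folding _ins over a list of pairs with distinct positions builds the ordered index
lemma pv_foldl_ins (L acc : List (Int × Int))
    (hacc : acc.Pairwise (fun x y => pvLt x y = true))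
    (hL : L.Pairwise (fun p q => p.2 ≠ q.2))
    (hdisj : ∀ p ∈ L, ∀ q ∈ acc, q.2 ≠ p.2) :
    (L.foldl (fun o q => pvIns q o) acc).Perm (acc ++ L) ∧
    (L.foldl (fun o q => pvIns q o) acc).Pairwise (fun x y => pvLt x y = true) := by
  induction L generalizing acc with
  | nil => exact ⟨by simp, hacc⟩
  | cons p t ih =>
    rw [List.pairwise_cons] at hL
    simp only [List.foldl_cons]
    have hacc' := pvIns_pairwise p acc hacc (hdisj p List.mem_cons_self)
    have hdisj' : ∀ r ∈ t, ∀ q ∈ pvIns p acc, q.2 ≠ r.2 := by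
      intro r hr q hq
      rcases List.mem_cons.mp (((pvIns_perm p acc).mem_iff).mp hq) with h' | h'
      · exact h' ▸ (hL.1 r hr)
      · exact hdisj r (List.mem_cons_of_mem p hr) q h'
    obtain ⟨hperm, hpw⟩ := ih (pvIns p acc) hacc' hL.2 hdisj'
    refine ⟨hperm.trans ?_, hpw⟩
    exact ((pvIns_perm p acc).append_right t).trans List.perm_middle.symm

-- the head of the ordered index is exactly what A recomputes: min(b) and b.index(min(b))
lemma pv_head_spec (bb : List Int) (m i : Int) (rest : List (Int × Int))
    (hinv : pvInv bb ((m, i) :: rest)) :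
    ∃ k : Nat, i = (k : Int) ∧ k < bb.length ∧ bb.getD k 0 = m ∧
      PySem.List.min? bb (fun x => x) = some m ∧
      PySem.List.index? bb m = some k := by
  obtain ⟨hperm, hpw⟩ := hinv
  have hmem : (m, i) ∈ pvPairs bb := hperm.mem_iff.mp List.mem_cons_self
  obtain ⟨k, hk, hkeq⟩ := List.mem_iff_getElem.mp hmem
  have hkl : k < bb.length := by rwa [pvPairs_length] at hk
  rw [pvPairs_getElem, Prod.mk.injEq] at hkeq
  obtain ⟨hm, hi⟩ := hkeq
  -- every pair of bb is either the head or lex-greater than it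
  have hall : ∀ j : Nat, (hj : j < bb.length) →
      (m < bb[j]'hj ∨ (m = bb[j]'hj ∧ i ≤ (j : Int))) := by
    intro j hj
    have hjm : (bb[j]'hj, (j : Int)) ∈ pvPairs bb := by
      rw [List.mem_iff_getElem]
      exact ⟨j, by rwa [pvPairs_length], by rw [pvPairs_getElem]⟩
    rcases List.mem_cons.mp ((hperm.mem_iff).mpr hjm) with h' | h'
    · rw [Prod.mk.injEq] at h'
      obtain ⟨h1, h2⟩ := h'
      exact Or.inr ⟨h1.symm, le_of_eq h2.symm⟩
    · have := (List.pairwise_cons.mp hpw).1 _ h'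
      rw [pvLt_iff] at this
      dsimp at this
      omega
  have hminle : ∀ j : Nat, (hj : j < bb.length) → m ≤ bb[j]'hj := by
    intro j hj; rcases hall j hj with h | h <;> omega
  have hbefore : ∀ j : Nat, (hj : j < k) → bb[j]'(by omega) ≠ m := by
    intro j hj hne
    rcases hall j (by omega) with h | h <;> omega
  refine ⟨k, hi.symm, hkl, by rw [List.getD_eq_getElem bb 0 hkl, hm], ?_, ?_⟩
  · -- min? returns some m
    cases h : PySem.List.min? bb (fun x => x) with
    | none =>
      have := (PySem.List.min?_eq_none_iff bb (fun x => x)).mp h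
      subst this; exact absurd hkl (by simp)
    | some m' =>
      have hm'mem : m' ∈ bb := PySem.List.min?_mem h
      have hmmem : m ∈ bb := hm ▸ List.getElem_mem hkl
      have h1 : m' ≤ m := PySem.List.min?_isMin h _ hmmem
      obtain ⟨j, hj, hjm⟩ := List.mem_iff_getElem.mp hm'mem
      have h2 : m ≤ m' := hjm ▸ hminle j hj
      simp only [Option.some.injEq]
      omega
  · rw [PySem.List.index?_eq_some_iff]
    refine ⟨bb.take k, bb.drop (k + 1), ?_, ?_, ?_⟩
    · conv_lhs => rw [← List.take_append_drop k bb]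
      rw [List.drop_eq_getElem_cons hkl, hm]
    · simp [List.length_take]; omega
    · intro hmem'
      obtain ⟨j, hj, hjm⟩ := List.mem_iff_getElem.mp hmem'
      have hjk : j < k := by simp [List.length_take] at hj; omega
      exact hbefore j hjk (by rwa [List.getElem_take] at hjm)

-- the replacement step preserves the invariant
lemma pv_step_inv (bb : List Int) (m : Int) (k : Nat) (rest : List (Int × Int)) (d : Int)
    (hkl : k < bb.length) (hm : bb[k]'hkl = m)
    (hinv : pvInv bb ((m, (k : Int)) :: rest)) :
    pvInv (bb.set k d) (pvIns (d, (k : Int)) rest) := by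
  obtain ⟨hperm, hpw⟩ := hinv
  have hpk : (pvPairs bb)[k]'(by rwa [pvPairs_length]) = (m, (k : Int)) := by
    rw [pvPairs_getElem, hm]
  -- pvPairs (bb.set k d) = (pvPairs bb).set k (d, k)
  have hpairs_set : pvPairs (bb.set k d) = (pvPairs bb).set k (d, (k : Int)) := by
    apply List.ext_getElem
    · simp [pvPairs_length]
    · intro j h1 h2
      have hj : j < bb.length := by simpa [pvPairs_length] using h2
      rw [pvPairs_getElem, List.getElem_set, List.getElem_set]
      by_cases hjk : j = k
      · subst hjk; simp
      · rw [if_neg (by omega : ¬ k = j), if_neg (by omega : ¬ k = j)]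
        exact (pvPairs_getElem bb j (by rwa [pvPairs_length])).symm
  have hkp : k < (pvPairs bb).length := by rwa [pvPairs_length]
  have hsplit : pvPairs bb =
      (pvPairs bb).take k ++ (m, (k : Int)) :: (pvPairs bb).drop (k + 1) := by
    conv_lhs => rw [← List.take_append_drop k (pvPairs bb)]
    rw [List.drop_eq_getElem_cons hkp, hpk]
  have hrest : rest.Perm ((pvPairs bb).take k ++ (pvPairs bb).drop (k + 1)) := by
    apply List.Perm.cons_inv (a := (m, (k : Int)))
    exact (hperm.trans (hsplit ▸ List.Perm.refl _)).trans List.perm_middle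
  -- every pair of rest sits at a position ≠ k
  have hsnd : ∀ q ∈ rest, q.2 ≠ (k : Int) := by
    intro q hq
    rcases List.mem_append.mp (hrest.mem_iff.mp hq) with h' | h'
    · obtain ⟨j, hj, hjm⟩ := List.mem_iff_getElem.mp h'
      have hjk : j < k := by
        have := hj; simp only [List.length_take] at this; omega
      rw [List.getElem_take] at hjm
      rw [← hjm, pvPairs_getElem]
      dsimp
      omega
    · obtain ⟨j, hj, hjm⟩ := List.mem_iff_getElem.mp h'
      rw [List.getElem_drop] at hjm
      rw [← hjm, pvPairs_getElem]
      dsimp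
      omega
  constructor
  · -- permutation
    have hset : (pvPairs bb).set k (d, (k : Int)) =
        (pvPairs bb).take k ++ (d, (k : Int)) :: (pvPairs bb).drop (k + 1) := by
      rw [List.set_eq_take_append_cons_drop, if_pos hkp]
    rw [hpairs_set, hset]
    exact ((pvIns_perm _ _).trans ((hrest.cons _).trans List.perm_middle.symm))
  · exact pvIns_pairwise _ rest (List.pairwise_cons.mp hpw).2 hsnd

lemma pv_set_ne_nil (bb : List Int) (hbb : bb ≠ []) (k : Nat) (d : Int) :
    bb.set k d ≠ [] := by
  intro h
  apply hbb
  have := congrArg List.length h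
  simp at this
  exact this

lemma pv_bridge (ds : List Int) (bb : List Int) (o : List (Int × Int))
    (hbb : bb ≠ []) (hinv : pvInv bb o) :
    ds.foldl pvStepA bb = (ds.foldl pvStepB (bb, o)).1 := by
  induction ds generalizing bb o with
  | nil => rfl
  | cons d ds ih =>
    simp only [List.foldl_cons]
    match o, hinv with
    | [], hinv =>
      exfalso
      have h0 := hinv.1.length_eq
      rw [pvPairs_length] at h0
      simp at h0
      exact hbb (List.length_eq_zero_iff.mp h0.symm)
    | (m, i) :: rest, hinv =>
      obtain ⟨k, hik, hkl, hm, hmin, hidx⟩ := pv_head_spec bb m i rest hinv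
      subst hik
      rw [List.getD_eq_getElem bb 0 hkl] at hm
      by_cases hgt : d > m
      · have hA : pvStepA bb d = bb.set k d := by
          unfold pvStepA
          rw [hmin]
          simp only [if_pos hgt, hidx]
        have hB : pvStepB (bb, (m, (k : Int)) :: rest) d = (bb.set k d, pvIns (d, (k : Int)) rest) := by
          unfold pvStepB
          simp only [if_pos hgt, PySem.List.pySetD_natCast]
        rw [hA, hB]
        exact ih _ _ (pv_set_ne_nil bb hbb k d) (pv_step_inv bb m k rest d hkl hm hinv)
      · have hA : pvStepA bb d = bb := by
          unfold pvStepA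
          rw [hmin]
          simp only [if_neg hgt]
        have hB : pvStepB (bb, (m, (k : Int)) :: rest) d = (bb, (m, (k : Int)) :: rest) := by
          unfold pvStepB
          simp only [if_neg hgt]
        rw [hA, hB]
        exact ih bb _ hbb hinv

lemma pv_pyRange_shift (c : Int) (K : Nat) :
    PySem.List.pyRange c (c + K) = (List.range K).map (fun k : Nat => c + (k : Int)) := by
  induction K with
  | zero => simp [PySem.List.pyRange_one_eq_nil]
  | succ K ih =>
    rw [show (c + ((K + 1 : Nat) : Int)) = (c + K) + 1 by push_cast; ring,
       PySem.List.pyRange_one_succ_right (by omega), ih]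
    simp [List.range_succ]

lemma pv_bridge2 (l : List Nat) (cA cB : Nat → Int) (dA dB : Int → Int)
    (hd : ∀ k ∈ l, dA (cA k) = dB (cB k)) (bb : List Int) (o : List (Int × Int))
    (hbb : bb ≠ []) (hinv : pvInv bb o) :
    (l.map cA).foldl (fun acc i => pvStepA acc (dA i)) bb
      = ((l.map cB).foldl (fun s j => pvStepB s (dB j)) (bb, o)).1 := by
  rw [List.foldl_map, List.foldl_map]
  have h1 : l.foldl (fun acc k => pvStepA acc (dA (cA k))) bb
      = (l.map (fun k => dA (cA k))).foldl pvStepA bb := (List.foldl_map).symm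
  have h2 : l.foldl (fun s k => pvStepB s (dB (cB k))) (bb, o)
      = (l.map (fun k => dB (cB k))).foldl pvStepB (bb, o) := (List.foldl_map).symm
  rw [h1, h2, List.map_congr_left hd]
  exact pv_bridge _ bb o hbb hinv

-- the initial ordered index satisfies the invariant
lemma pv_order0_inv (b1 : List Int) :
    pvInv b1 ((pvPairs b1).foldl (fun o q => pvIns q o) []) := by
  obtain ⟨hperm, hpw⟩ := pv_foldl_ins (pvPairs b1) [] (List.Pairwise.nil)
    (pvPairs_snd_distinct b1) (by intro p _ q hq; exact absurd hq (List.not_mem_nil))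
  exact ⟨by simpa using hperm, hpw⟩

-- ===== VERDICT (by name: the statement is the Claim_ definition above) =====
theorem largest_n_spec : Claim_equal_largest_n := by
  intro a b n _ hpre
  obtain ⟨h1, h2, h3⟩ := hpre
  unfold Spec_largest_n largest_n largest_n_alt
  rw [PySem.List.foldl_append_singleton_eq_map]
  set b1 := b ++ (PySem.List.pyRange 0 n).map
      (fun t => |PySem.List.pyGetD a (t + 1) 0 - PySem.List.pyGetD a t 0|) with hb1
  by_cases hL : (a.length : Int) ≤ n + 1
  · rw [PySem.List.pyRange_one_eq_nil (show (a.length : Int) - (n + 1) ≤ 0 by omega),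
      PySem.List.pyRange_one_eq_nil (show (a.length : Int) - 1 ≤ n by omega)]
    rfl
  · have hb : b1 ≠ [] := by
      rcases h3 with h | h | h
      · exact hb1 ▸ List.append_ne_nil_of_left_ne_nil h _
      · rw [hb1, PySem.List.pyRange_one_cons (show (0 : Int) < n by omega)]
        simp
      · omega
    have hKdef : ((a.length : Int) - (n + 1))
        = ((((a.length : Int) - (n + 1)).toNat : Nat) : Int) := by omega
    have hK2 : ((a.length : Int) - 1) = n + ((((a.length : Int) - (n + 1)).toNat : Nat) : Int) := by
      omega
    rw [hKdef, PySem.List.pyRange_zero_natCast, hK2, pv_pyRange_shift]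
    have hord : ((PySem.List.enumerate b1 0).map (fun p => (p.2, p.1))).foldl
        (fun o q => pvIns q o) [] = (pvPairs b1).foldl (fun o q => pvIns q o) [] := rfl
    have hbr := pv_bridge2 (List.range (((a.length : Int) - (n + 1)).toNat))
      (fun k => (k : Int)) (fun k => n + (k : Int))
      (fun i => |PySem.List.pyGetD a (i + n + 1) 0 - PySem.List.pyGetD a (i + n) 0|)
      (fun j => |PySem.List.pyGetD a (j + 1) 0 - PySem.List.pyGetD a j 0|)
      (by intro k _; beta_reduce; rw [Int.add_comm (k : Int) n]) b1
      ((pvPairs b1).foldl (fun o q => pvIns q o) []) hb (pv_order0_inv b1)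
    with_unfolding_all exact hbr
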